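-- pv_equiv track=rewrite | github.com/wallberg/sandbox-go | com/github/wallberg/taocp/BooleanBasics.py | str_subcube
-- ===== SOURCE A (Python) =====
-- def str_subcube(n, a, b):
--     '''Return string representation of an n-bit subcube in (a, b) form. '''
--
--     s = ''
--     for j in range(n-1, -1, -1):
--         if a & (1 << j) == (1 << j):
--             s += '*'
--         else:
--             s += '0' if b & (1 << j) == 0 else '1'
--     return s
-- ===== SOURCE B (Python) =====
-- def str_subcube(n, a, b):
--     if n <= 0:
--         return ''
--     mask = (1 << n) - 1
--     sa = format(a & mask, '0{}b'.format(n))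
--     sb = format(b & mask, '0{}b'.format(n))
--     return ''.join('*' if ca == '1' else cb for ca, cb in zip(sa, sb))
-- ===== Notes on version B (the rewrite author's own statement) =====
-- stated objective: faster
-- what changed: B is two staged passes instead of A's per-bit loop: it first formats a&mask and b&mask as zero-padded n-bit binary strings with format(), then zips the two strings and emits '*' where a's character is '1' and b's character otherwise.
import Mathlib
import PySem

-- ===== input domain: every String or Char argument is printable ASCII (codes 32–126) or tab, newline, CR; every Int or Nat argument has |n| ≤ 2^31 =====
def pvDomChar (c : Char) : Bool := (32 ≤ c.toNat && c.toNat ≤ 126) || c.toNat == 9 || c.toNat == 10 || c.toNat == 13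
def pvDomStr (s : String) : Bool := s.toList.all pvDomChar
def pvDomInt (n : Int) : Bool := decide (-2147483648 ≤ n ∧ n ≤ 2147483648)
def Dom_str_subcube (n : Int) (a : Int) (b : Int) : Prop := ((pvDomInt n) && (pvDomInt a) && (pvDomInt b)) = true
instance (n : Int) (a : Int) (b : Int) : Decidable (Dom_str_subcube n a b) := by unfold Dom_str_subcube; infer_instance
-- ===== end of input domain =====

-- B replaces A's per-bit masked loop by two staged passes: format a and b (masked to n bits)
-- as zero-padded binary strings first, then merge the two strings character by character
-- ('*' where a's character is '1', otherwise b's character); the bulk format() conversions make B measurably faster.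

-- ===== PORT A =====
-- A: for j in range(n-1, -1, -1): append '*' if a & (1<<j) == (1<<j), else bit j of b.
def str_subcube (n : Int) (a : Int) (b : Int) : String :=
  String.mk ((PySem.List.pyRange (n - 1) (-1) (-1)).foldl
    (fun s j =>
      s ++ [if PySem.Int.band a ((1 <<< j.toNat : Nat) : Int) = ((1 <<< j.toNat : Nat) : Int) then '*'
            else if PySem.Int.band b ((1 <<< j.toNat : Nat) : Int) = 0 then '0' else '1'])
    [])

-- ===== PORT B =====
-- B helper: format(v, '0wb') as a character list — width-w zero-padded binary of v, MSB first.
-- Exact for Python's format because B only calls it with 0 ≤ v < 2^w (v is masked to w bits).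
def pvBinPad : Nat → Nat → List Char
  | 0, _ => []
  | w + 1, v => pvBinPad w (v / 2) ++ [if v % 2 = 1 then '1' else '0']

def str_subcube_alt (n : Int) (a : Int) (b : Int) : String :=
  if n ≤ 0 then "" else
    let mask : Int := ((1 <<< n.toNat : Nat) : Int) - 1
    let sa := pvBinPad n.toNat (PySem.Int.band a mask).toNat
    let sb := pvBinPad n.toNat (PySem.Int.band b mask).toNat
    String.mk ((sa.zip sb).map (fun p => if p.1 = '1' then '*' else p.2))

-- ===== PRECONDITION & SPEC =====
def Spec_str_subcube (n : Int) (a : Int) (b : Int) (out : String) : Prop := out = str_subcube_alt n a b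
instance (n : Int) (a : Int) (b : Int) (out : String) : Decidable (Spec_str_subcube n a b out) := by unfold Spec_str_subcube; infer_instance

-- ===== CLAIM (what is proved, stated in full; the proofs are below) =====
def Claim_equal_str_subcube : Prop := ∀ (n : Int) (a : Int) (b : Int), Dom_str_subcube n a b → Spec_str_subcube n a b (str_subcube n a b)

-- ===== LEMMAS AND PROOFS =====

-- The character both programs emit for bit position j (Python two's-complement bit test).
def pvBitChar (a b : Int) (j : Nat) : Char :=
  if a.testBit j then '*' else if b.testBit j then '1' else '0'

-- band with a power of two selects the tested bit (both signs, Python two's complement).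
lemma band_one_shiftLeft (a : Int) (k : Nat) :
    PySem.Int.band a ((1 <<< k : Nat) : Int) = if a.testBit k then ((1 <<< k : Nat) : Int) else 0 := by
  rw [Nat.one_shiftLeft]
  cases a with
  | ofNat m =>
      have h : (Int.ofNat m) = ((m : Nat) : Int) := rfl
      rw [h, PySem.Int.band_natCast, Nat.and_two_pow]
      cases hb : m.testBit k <;> simp [Int.testBit, hb]
  | negSucc m =>
      have h0 : ¬ (0 : Int) ≤ Int.negSucc m := by omega
      have h1 : (0 : Int) ≤ ((2 ^ k : Nat) : Int) := by positivity
      have h2 : (-(Int.negSucc m) - 1) = (m : Int) := by omega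
      simp only [PySem.Int.band, h0, if_pos h1, h2, if_false]
      rw [Int.toNat_natCast, Int.toNat_natCast, Nat.two_pow_and]
      cases hb : m.testBit k <;> simp [Int.testBit, hb]

-- A's branch chain at bit position j computes pvBitChar.
lemma branch_char_eq (a b : Int) (j : Nat) :
    (if PySem.Int.band a ((1 <<< j : Nat) : Int) = ((1 <<< j : Nat) : Int) then '*'
     else if PySem.Int.band b ((1 <<< j : Nat) : Int) = 0 then '0' else '1') = pvBitChar a b j := by
  rw [band_one_shiftLeft, band_one_shiftLeft, pvBitChar]
  cases ha : a.testBit j <;> cases hb : b.testBit j <;>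
    simp [Nat.one_shiftLeft] <;> exact fun h => pow_ne_zero j two_ne_zero h.symm

-- range(n-1, -1, -1) enumerates n-1, n-2, …, 0 (empty for n ≤ 0).
lemma pyRange_down (n : Int) :
    PySem.List.pyRange (n - 1) (-1) (-1) = (List.range n.toNat).map (fun (k : Nat) => n - 1 - (k : Int)) := by
  simp only [PySem.List.pyRange]
  rw [if_neg (by norm_num : ¬ (-1 : Int) = 0)]
  rw [if_neg (by norm_num : ¬ (0 : Int) < -1)]
  by_cases h : 0 < n
  · rw [if_pos (by omega : (-1 : Int) < n - 1)]
    have hc : ((n - 1 - -1 + - -1 - 1) / - -1).toNat = n.toNat := by norm_num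
    rw [hc]
    apply List.map_congr_left
    intro k _
    ring
  · rw [if_neg (by omega : ¬ (-1 : Int) < n - 1)]
    rw [show n.toNat = 0 by omega]
    rfl

-- reversing a map over range 0..w-1 re-indexes it by w-1-k.
lemma rev_map_range {α : Type} (w : Nat) (f : Nat → α) :
    ((List.range w).map f).reverse = (List.range w).map (fun k => f (w - 1 - k)) := by
  rw [← List.map_reverse, List.range_eq_range', List.reverse_range', List.map_map,
      ← List.range_eq_range']
  apply List.map_congr_left
  intro k _
  simp [Function.comp]

-- A's folded list is the bit characters, MSB first.
lemma strSubcube_list_eq (n a b : Int) :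
    (PySem.List.pyRange (n - 1) (-1) (-1)).foldl
      (fun s j =>
        s ++ [if PySem.Int.band a ((1 <<< j.toNat : Nat) : Int) = ((1 <<< j.toNat : Nat) : Int) then '*'
              else if PySem.Int.band b ((1 <<< j.toNat : Nat) : Int) = 0 then '0' else '1'])
      []
      = ((List.range n.toNat).map (pvBitChar a b)).reverse := by
  rw [pyRange_down, PySem.List.foldl_append_singleton_eq_map, List.nil_append, List.map_map,
      rev_map_range]
  apply List.map_congr_left
  intro k hk
  rw [List.mem_range] at hk
  have ht : (n - 1 - (k : Int)).toNat = n.toNat - 1 - k := by omega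
  simp only [Function.comp]
  rw [ht, branch_char_eq]

-- pvBinPad lists the bit characters of v, MSB first (positions w-1 down to 0).
lemma pvBinPad_eq_map (w : Nat) (v : Nat) :
    pvBinPad w v = (List.range w).map (fun k => if v.testBit (w - 1 - k) then '1' else '0') := by
  induction w generalizing v with
  | zero => rfl
  | succ w ih =>
      rw [pvBinPad, ih, List.range_succ, List.map_append]
      congr 1
      · apply List.map_congr_left
        intro k hk
        rw [List.mem_range] at hk
        have h : w - k = (w - 1 - k).succ := by omega
        rw [show w + 1 - 1 - k = w - k by omega, h, Nat.testBit_succ]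
      · have h0 : v.testBit 0 = decide (v % 2 = 1) := by
          simp [Nat.testBit_zero]
        simp [h0]

-- the masked value's low n bits are Python's two's-complement bits of the original int.
lemma band_mask_testBit (a : Int) (n j : Nat) (hj : j < n) :
    (PySem.Int.band a (((1 <<< n : Nat) : Int) - 1)).toNat.testBit j = a.testBit j := by
  have hm : (((1 <<< n : Nat) : Int) - 1) = ((2 ^ n - 1 : Nat) : Int) := by
    rw [Nat.one_shiftLeft]
    have : 1 ≤ 2 ^ n := Nat.one_le_two_pow
    push_cast [this]
    ring
  rw [hm]
  cases a with
  | ofNat m =>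
      have h : (Int.ofNat m) = ((m : Nat) : Int) := rfl
      rw [h, PySem.Int.band_natCast, Int.toNat_natCast, Nat.testBit_and,
          Nat.testBit_two_pow_sub_one]
      simp [Int.testBit, hj]
  | negSucc m =>
      have h0 : ¬ (0 : Int) ≤ Int.negSucc m := by omega
      have h1 : (0 : Int) ≤ ((2 ^ n - 1 : Nat) : Int) := by positivity
      have h2 : (-(Int.negSucc m) - 1) = (m : Int) := by omega
      simp only [PySem.Int.band, h0, if_pos h1, h2, if_false]
      rw [Int.toNat_natCast, Int.toNat_natCast, Nat.and_comm, Nat.and_two_pow_sub_one_eq_mod,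
          Int.toNat_natCast]
      have hlt : m % 2 ^ n < 2 ^ n := Nat.mod_lt _ (Nat.two_pow_pos n)
      have hs : 2 ^ n - 1 - m % 2 ^ n = 2 ^ n - (m % 2 ^ n + 1) := by omega
      rw [hs, Nat.testBit_two_pow_sub_succ hlt, Nat.testBit_mod_two_pow]
      simp [Int.testBit, hj]

-- ===== VERDICT (by name: the statement is the Claim_ definition above) =====
theorem str_subcube_spec : Claim_equal_str_subcube := by
  intro n a b _
  unfold Spec_str_subcube str_subcube str_subcube_alt
  rw [strSubcube_list_eq]
  by_cases hn : n ≤ 0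
  · rw [if_pos hn, show n.toNat = 0 by omega]
    rfl
  · rw [if_neg hn]
    simp only [pvBinPad_eq_map, List.zip_map', List.map_map, rev_map_range]
    congr 1
    apply List.map_congr_left
    intro k hk
    rw [List.mem_range] at hk
    have hj : n.toNat - 1 - k < n.toNat := by omega
    simp only [Function.comp, band_mask_testBit a n.toNat _ hj, band_mask_testBit b n.toNat _ hj,
      pvBitChar]
    cases ha : a.testBit (n.toNat - 1 - k) <;> cases hb : b.testBit (n.toNat - 1 - k) <;> simp
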